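-- pv_equiv track=rewrite | github.com/weblate/gitfourchette | test/test_graphsplicer.py | parseAncestryDefinition
-- ===== SOURCE A (Python) =====
-- def parseAncestryDefinition(text):
--     sequence = []
--     parentsOf = {}
--     seen = set()
--     heads = set()
--
--     for line in text:
--         line = line.strip()
--         if not line:
--             continue
--
--         split = line.strip().split(":")
--         assert 1 <= len(split) <= 2
--
--         chainStr = split[0]
--         assert chainStr
--         assert "," not in chainStr
--
--         try:
--             assert "-" not in split[1]
--             rootParents = split[1].split(",")
--         except IndexError:
--             rootParents = []
--
--         chain = chainStr.split("-")
--         parents = [[c] for c in chain[1:]] + [rootParents]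
--
--         for commit, commitParents in zip(chain, parents):
--             assert commit not in parentsOf, f"Commit hash appears twice in sequence! {commit}"
--             sequence.append(commit)
--             parentsOf[commit] = commitParents
--             if commit not in seen:
--                 heads.add(commit)
--             seen.update(parentsOf[commit])
--
--     return sequence, parentsOf, heads
-- ===== SOURCE B (Python) =====
-- def parseAncestryDefinition(text):
--     def parseLine(line):
--         line = line.strip()
--         if not line:
--             return []
--         split = line.split(":")
--         assert 1 <= len(split) <= 2
--         chainStr = split[0]
--         assert chainStr
--         assert "," not in chainStr
--         if len(split) > 1:
--             assert "-" not in split[1]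
--             roots = split[1].split(",")
--         else:
--             roots = []
--         chain = chainStr.split("-")
--         return [(a, [b]) for a, b in zip(chain, chain[1:])] + [(chain[-1], roots)]
--
--     pairs = [p for line in text for p in parseLine(line)]
--     sequence = [c for c, _ in pairs]
--     assert len(set(sequence)) == len(sequence), "Commit hash appears twice in sequence!"
--     parentsOf = dict(pairs)
--     # A commit is a head iff no strictly earlier commit lists it as a parent:
--     # checked directly by scanning the prefix, no running 'seen' state.
--     heads = {c for i, (c, _) in enumerate(pairs)
--              if not any(c in ps for _, ps in pairs[:i])}
--     return sequence, parentsOf, heads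
-- ===== Notes on version B (the rewrite author's own statement) =====
-- stated objective: alternative
-- what changed: Head detection no longer simulates A's running 'seen' set: B derives heads from a direct predicate (a commit is a head iff no strictly earlier entry lists it as a parent, checked by rescanning the prefix), parsing is factored into a per-line helper producing (commit,parents) pairs, the duplicate check becomes one len(set) comparison, and parentsOf is built by dict() in one shot.
import Mathlib
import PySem

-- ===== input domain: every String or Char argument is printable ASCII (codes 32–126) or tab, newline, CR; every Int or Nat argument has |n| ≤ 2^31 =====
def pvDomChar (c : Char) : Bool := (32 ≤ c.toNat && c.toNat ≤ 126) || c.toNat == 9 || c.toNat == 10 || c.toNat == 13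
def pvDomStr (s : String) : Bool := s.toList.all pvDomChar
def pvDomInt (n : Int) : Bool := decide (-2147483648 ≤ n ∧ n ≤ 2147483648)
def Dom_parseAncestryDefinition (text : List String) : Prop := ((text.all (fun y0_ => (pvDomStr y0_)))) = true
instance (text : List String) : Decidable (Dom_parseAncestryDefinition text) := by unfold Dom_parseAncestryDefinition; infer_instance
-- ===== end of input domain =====

-- B replaces A's running 'seen'-set head detection by a direct predicate (a commit is a head iff
-- no strictly earlier entry lists it as a parent, checked by rescanning the prefix) over a
-- per-line-parsed pair list; same results, quadratic head scan (objective: alternative).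

-- ===== PORT A =====
-- state: (sequence, parentsOf, seen, heads)
-- body of A's inner 'for commit, commitParents in zip(chain, parents)' loop;
-- 'assert commit not in parentsOf' raises only outside Pre_, the port proceeds
def pvACommitStep
    (st : List String × PySem.Dict String (List String) × PySem.Set String × PySem.Set String)
    (p : String × List String) :
    List String × PySem.Dict String (List String) × PySem.Set String × PySem.Set String :=
  (st.1 ++ [p.1],                                                           -- sequence.append(commit)
   st.2.1.insert p.1 p.2,                                                   -- parentsOf[commit] = commitParents
   PySem.Set.update st.2.2.1 p.2,                                           -- seen.update(parentsOf[commit])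
   if PySem.Set.contains st.2.2.1 p.1 then st.2.2.2                         -- if commit not in seen:
   else PySem.Set.add st.2.2.2 p.1)                                         --   heads.add(commit)  (tests the OLD seen)

-- body of A's outer 'for line in text' loop; the shape asserts (1 <= len(split) <= 2, chainStr
-- nonempty, no ',' in chainStr, no '-' in split[1]) raise only outside Pre_, the port proceeds
def pvALineStep
    (st : List String × PySem.Dict String (List String) × PySem.Set String × PySem.Set String)
    (line0 : String) :
    List String × PySem.Dict String (List String) × PySem.Set String × PySem.Set String :=
  let line := PySem.Str.strip line0
  if line = "" then st                                                      -- continue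
  else
    let split := (PySem.Str.split? line ":").getD []                        -- line.split(":"); ":" ≠ "" so never none
    let chainStr := split.headD ""                                          -- split[0]; split is never empty
    let rootParents := ((PySem.List.pyGet? split 1).map                     -- try: rootParents = split[1].split(",")
      (fun s => (PySem.Str.split? s ",").getD [])).getD []                  -- except IndexError: rootParents = []
    let chain := (PySem.Str.split? chainStr "-").getD []                    -- chainStr.split("-")
    let parents := (chain.drop 1).map (fun c => [c]) ++ [rootParents]       -- [[c] for c in chain[1:]] + [rootParents]
    (chain.zip parents).foldl pvACommitStep st

def parseAncestryDefinition (text : List String) : List String × (List (String × List String)) × List String :=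
  let st := text.foldl pvALineStep ([], PySem.Dict.empty, PySem.Set.empty, PySem.Set.empty)
  (st.1, st.2.1.items, st.2.2.2)

-- ===== PORT B =====
-- Source B's parseLine: the (commit, parents) pairs one line contributes;
-- its asserts raise only outside Pre_, the port proceeds
def pvParseLine (line0 : String) : List (String × List String) :=
  let line := PySem.Str.strip line0
  if line = "" then []                                                      -- return []
  else
    let split := (PySem.Str.split? line ":").getD []                        -- line.split(":")
    let chainStr := split.headD ""                                          -- split[0]
    let roots := if 1 < split.length                                        -- if len(split) > 1:
      then (PySem.Str.split? (split.getD 1 "") ",").getD []                 --   roots = split[1].split(",")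
      else []
    let chain := (PySem.Str.split? chainStr "-").getD []                    -- chainStr.split("-")
    (chain.zip (chain.drop 1)).map (fun ab => (ab.1, [ab.2]))               -- [(a,[b]) for a,b in zip(chain, chain[1:])]
      ++ [(PySem.List.pyGetD chain (-1) "", roots)]                         -- + [(chain[-1], roots)]; chain never empty

def parseAncestryDefinition_alt (text : List String) : List String × (List (String × List String)) × List String :=
  let pairs := text.flatMap pvParseLine                                     -- [p for line in text for p in parseLine(line)]
  let sequence := pairs.map (·.1)                                           -- [c for c, _ in pairs]
  -- 'assert len(set(sequence)) == len(sequence)' raises only outside Pre_, the port proceeds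
  let parentsOf := pairs.foldl (fun d p => d.insert p.1 p.2) PySem.Dict.empty   -- dict(pairs)
  let heads := (PySem.List.enumerate pairs 0).foldl (fun hs ip =>           -- {c for i,(c,_) in enumerate(pairs)
      if (PySem.List.slice pairs none (some ip.1)).any                      --  if not any(c in ps
           (fun q => q.2.contains ip.2.1)                                   --             for _, ps in pairs[:i])}
      then hs else PySem.Set.add hs ip.2.1) PySem.Set.empty
  (sequence, parentsOf.items, heads)

-- ===== PRECONDITION & SPEC =====
-- shape A's asserts demand of one line (after strip): blank, or at most one ':',
-- nonempty chain part without ',', and no '-' in the parent part when present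
def pvLineOk (line0 : String) : Bool :=
  let line := PySem.Str.strip line0
  line == "" ||
    (let split := (PySem.Str.split? line ":").getD []
     split.length ≤ 2 && split.headD "" != "" && !(PySem.Str.isIn "," (split.headD "")) &&
       (split.length != 2 || !(PySem.Str.isIn "-" (split.getD 1 ""))))

-- the commits a line contributes (for the no-duplicate assert)
def pvChainOf (line0 : String) : List String :=
  let line := PySem.Str.strip line0
  if line = "" then []
  else (PySem.Str.split? (((PySem.Str.split? line ":").getD []).headD "") "-").getD []

-- Pre_ = exactly the inputs on which the Python A returns (no AssertionError):
-- every line well-shaped and no commit hash appearing twice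
def Pre_parseAncestryDefinition (text : List String) : Prop :=
  text.all pvLineOk = true ∧ (text.flatMap pvChainOf).Nodup
instance (text : List String) : Decidable (Pre_parseAncestryDefinition text) := by
  unfold Pre_parseAncestryDefinition; infer_instance

def pvWitness_parseAncestryDefinition : List String := ["c-b-a", " x:a ", "", "y:a,b"]

def Spec_parseAncestryDefinition (text : List String) (out : List String × (List (String × List String)) × List String) : Prop := out = parseAncestryDefinition_alt text
instance (text : List String) (out : List String × (List (String × List String)) × List String) : Decidable (Spec_parseAncestryDefinition text out) := by unfold Spec_parseAncestryDefinition; infer_instance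

-- ===== CLAIM (what is proved, stated in full; the proofs are below) =====
def Claim_equal_parseAncestryDefinition : Prop := ∀ (text : List String), Dom_parseAncestryDefinition text → Pre_parseAncestryDefinition text → Spec_parseAncestryDefinition text (parseAncestryDefinition text)

-- ===== LEMMAS AND PROOFS =====

theorem pvGo_ne_nil (sep : List Char) : ∀ fuel l cur acc, PySem.Chars.splitOn.go sep fuel l cur acc ≠ [] := by
  intro fuel
  induction fuel with
  | zero => intro l cur acc; simp [PySem.Chars.splitOn.go]
  | succ n ih =>
    intro l cur acc
    cases l with
    | nil => simp [PySem.Chars.splitOn.go]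
    | cons c rest =>
      rw [PySem.Chars.splitOn.go]
      split
      · exact ih _ _ _
      · exact ih _ _ _

theorem pvSplit_ne_nil (s sep : String) (h : sep.toList ≠ []) : (PySem.Str.split? s sep).getD [] ≠ [] := by
  simp only [PySem.Str.split?, PySem.Chars.split?, List.isEmpty_iff, if_neg h, Option.map_some,
    Option.getD_some, ne_eq, List.map_eq_nil_iff, PySem.Chars.splitOn]
  exact pvGo_ne_nil _ _ _ _ _

-- A's try/except around split[1] agrees with B's length test
theorem pvGet1_eq (l : List String) (f : String → List String) :
    ((PySem.List.pyGet? l 1).map f).getD []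
      = if 1 < l.length then f (l.getD 1 "") else [] := by
  match l with
  | [] => rfl
  | [a] => rfl
  | a :: b :: t => simp [PySem.List.pyGet?, PySem.List.pyIdx?]

-- A's zip(chain, [[c] for c in chain[1:]] + [rootParents]) is B's pair list for the same chain
theorem pvZip_eq (c : String) (cs rp : List String) :
    (c :: cs).zip ((cs.map fun x => [x]) ++ [rp])
      = ((c :: cs).zip cs).map (fun ab => (ab.1, [ab.2]))
          ++ [(PySem.List.pyGetD (c :: cs) (-1) "", rp)] := by
  induction cs generalizing c with
  | nil =>
    rw [PySem.List.pyGetD_neg_one (xs := [c]) (d := "") (by simp)]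
    simp
  | cons c' cs' ih =>
    have h1 := PySem.List.pyGetD_neg_one (xs := c :: c' :: cs') (d := "") (by simp)
    have h2 := PySem.List.pyGetD_neg_one (xs := c' :: cs') (d := "") (by simp)
    simp only [List.zip_cons_cons, List.map_cons, List.cons_append, ih c', h1, h2,
      List.getLast_cons (by simp : c' :: cs' ≠ [])]

-- one step of A's outer loop = folding A's commit step over B's pair list for that line
theorem pvALineStep_eq
    (st : List String × PySem.Dict String (List String) × PySem.Set String × PySem.Set String)
    (line0 : String) :
    pvALineStep st line0 = (pvParseLine line0).foldl pvACommitStep st := by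
  unfold pvALineStep pvParseLine
  by_cases h : PySem.Str.strip line0 = ""
  · simp [h]
  · simp only [if_neg h, pvGet1_eq]
    obtain ⟨c, cs, hc⟩ := List.exists_cons_of_ne_nil
      (pvSplit_ne_nil (((PySem.Str.split? (PySem.Str.strip line0) ":").getD []).headD "") "-" (by decide))
    rw [hc]
    simp only [List.drop_one, List.tail_cons]
    rw [pvZip_eq]

-- A's whole fused loop = A's commit step folded over B's concatenated pair list
theorem pvAFold_eq (text : List String)
    (st : List String × PySem.Dict String (List String) × PySem.Set String × PySem.Set String) :
    text.foldl pvALineStep st = (text.flatMap pvParseLine).foldl pvACommitStep st := by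
  induction text generalizing st with
  | nil => rfl
  | cons l t ih => simp [List.foldl_cons, pvALineStep_eq, ih, List.foldl_append]

-- A's head/seen machinery, isolated (proof helper; not part of either port's definition path)
def pvHS (hs : PySem.Set String × PySem.Set String) (p : String × List String) :
    PySem.Set String × PySem.Set String :=
  (if PySem.Set.contains hs.2 p.1 then hs.1 else PySem.Set.add hs.1 p.1,
   PySem.Set.update hs.2 p.2)

-- folding A's fused step splits into the three independent components
theorem pvDecomp (ps : List (String × List String)) (s : List String)
    (d : PySem.Dict String (List String)) (sn h : PySem.Set String) :
    ps.foldl pvACommitStep (s, d, sn, h)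
      = (s ++ ps.map (·.1),
         ps.foldl (fun d p => d.insert p.1 p.2) d,
         (ps.foldl pvHS (h, sn)).2,
         (ps.foldl pvHS (h, sn)).1) := by
  induction ps generalizing s d sn h with
  | nil => simp
  | cons p t ih =>
    simp only [List.foldl_cons, pvACommitStep, pvHS, ih, List.map_cons,
      List.append_assoc, List.singleton_append]

theorem pvContains_update (sn : PySem.Set String) (l : List String) (c : String) :
    (PySem.Set.update sn l).contains c = (sn.contains c || l.contains c) := by
  rw [Bool.eq_iff_iff]
  simp

-- B's head recursion with an explicit processed-prefix accumulator (proof helper)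
def pvBGo (pre : List (String × List String)) (ps : List (String × List String))
    (h : PySem.Set String) : PySem.Set String :=
  match ps with
  | [] => h
  | p :: rest =>
      pvBGo (pre ++ [p]) rest
        (if pre.any (fun q => q.2.contains p.1) then h else PySem.Set.add h p.1)

-- invariant: whenever 'sn' holds exactly the parents listed by 'pre', A's running-seen head
-- fold over the rest equals B's prefix-scan recursion
theorem pvHS_eq_bgo : ∀ (ps pre : List (String × List String)) (h sn : PySem.Set String),
    (∀ c, sn.contains c = pre.any (fun q => q.2.contains c)) →
    (ps.foldl pvHS (h, sn)).1 = pvBGo pre ps h := by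
  intro ps
  induction ps with
  | nil => intro pre h sn _; rfl
  | cons p rest ih =>
    intro pre h sn hinv
    simp only [List.foldl_cons, pvHS, pvBGo, hinv p.1]
    refine ih (pre ++ [p]) _ _ (fun c => ?_)
    rw [pvContains_update, hinv c, List.any_append]
    simp

-- B's enumerate/take fold over the whole pair list equals the prefix recursion
theorem pvEnum_eq_bgo (ps : List (String × List String)) :
    ∀ (rest pre : List (String × List String)) (h : PySem.Set String), ps = pre ++ rest →
    ((PySem.List.enumerate rest (pre.length : Int)).foldl (fun hs ip =>
        if (PySem.List.slice ps none (some ip.1)).any (fun q => q.2.contains ip.2.1)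
        then hs else PySem.Set.add hs ip.2.1) h)
      = pvBGo pre rest h := by
  intro rest
  induction rest with
  | nil => intro pre h _; rfl
  | cons p rest ih =>
    intro pre h hps
    rw [PySem.List.enumerate_cons, List.foldl_cons]
    have hsl : PySem.List.slice ps none (some (pre.length : Int)) = pre := by
      rw [PySem.List.slice_to_natCast, hps, List.take_left]
    simp only [hsl]
    have hlen : (pre.length : Int) + 1 = ((pre ++ [p]).length : Int) := by
      simp
    rw [hlen, pvBGo]
    exact ih (pre ++ [p]) _ (by simpa using hps)

-- ===== VERDICT (by name: the statement is the Claim_ definition above) =====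
theorem parseAncestryDefinition_spec : Claim_equal_parseAncestryDefinition := by
  intro text _ _
  unfold Spec_parseAncestryDefinition parseAncestryDefinition parseAncestryDefinition_alt
  rw [pvAFold_eq, pvDecomp]
  rw [pvHS_eq_bgo (text.flatMap pvParseLine) [] PySem.Set.empty PySem.Set.empty (fun c => rfl)]
  have he := pvEnum_eq_bgo (text.flatMap pvParseLine) (text.flatMap pvParseLine) [] PySem.Set.empty rfl
  simp only [List.length_nil, Nat.cast_zero] at he
  rw [← he]
  simp
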